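-- pv_equiv track=rewrite | github.com/ant-louis/netbert-search | index_creation/tools/clean_all.py | process_section_names
-- ===== SOURCE A (Python) =====
-- def is_sentence(text):
--     """
--     Check if a piece of text ends by a punctuation.
--     """
--     return text and text[-1] in set('!.:;?')
--
-- def process_section_names(text_list):
--     """
--     """
--     # Extract sentences from the list.
--     sentences = []
--     while text_list and is_sentence(text_list[-1]):
--         sentences.insert(0, text_list.pop(-1))
--
--     # Remaining text that are not sentences are sections.
--     sections = text_list
--
--     # Join sections together.
--     section = '- ' + ' - '.join(sections) + ' ' if (sections and sections[0]) else ''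
--
--     # Join sentences together.
--     sentence = ' '.join(sentences)
--
--     # Build formatted line.
--     line = section + '* ' + sentence
--     return line
-- ===== SOURCE B (Python) =====
-- def process_section_names(text_list):
--     # One backward scan finds the section/sentence boundary, then slice.
--     # (Note: unlike A, this does not mutate text_list; return value is identical.)
--     k = 0
--     for s in reversed(text_list):
--         if s and s[-1] in '!.:;?':
--             k += 1
--         else:
--             break
--     i = len(text_list) - k
--     sections = text_list[:i]
--     sentences = text_list[i:]
--     section = '- ' + ' - '.join(sections) + ' ' if (sections and sections[0]) else ''
--     return section + '* ' + ' '.join(sentences)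
-- ===== Notes on version B (the rewrite author's own statement) =====
-- stated objective: alternative
-- what changed: Replaces A's destructive pop/insert(0) loop by a single backward scan that finds the boundary index and then slices into sections/sentences; it trades A's in-place list surgery (quadratic in the number of trailing sentences) for non-mutating slicing of the same overall linear cost on typical inputs.
import Mathlib
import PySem

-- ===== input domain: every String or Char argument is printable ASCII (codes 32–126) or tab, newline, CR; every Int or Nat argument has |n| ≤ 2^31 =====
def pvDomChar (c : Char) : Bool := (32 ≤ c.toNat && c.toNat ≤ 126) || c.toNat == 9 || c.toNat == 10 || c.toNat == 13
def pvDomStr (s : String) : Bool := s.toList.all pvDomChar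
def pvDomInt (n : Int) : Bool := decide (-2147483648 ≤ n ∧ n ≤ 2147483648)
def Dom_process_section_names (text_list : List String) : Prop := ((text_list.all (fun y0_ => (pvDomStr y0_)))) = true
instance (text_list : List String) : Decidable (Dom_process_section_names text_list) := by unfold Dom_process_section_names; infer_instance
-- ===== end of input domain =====

-- B replaces A's pop/insert(0) loop by one backward scan for the boundary index plus two slices (alternative decomposition).
-- A mutates text_list in place (pops trailing items); B does not — the equivalence proved is about the return value.

-- ===== PORT A =====
-- is_sentence(text): 'text and text[-1] in set("!.:;?")' used in boolean context
def pvIsSentenceA (s : String) : Bool :=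
  !(s == "") &&
    (match PySem.Str.pyGet? s (-1) with
     | some c => decide (c ∈ PySem.Set.ofList "!.:;?".toList)
     | none => false)

-- the while loop: pop last element, insert at front of sentences
def pvALoop (tl sents : List String) : List String × List String :=
  match h : tl.getLast? with
  | none => (tl, sents)
  | some s =>
      if pvIsSentenceA s then pvALoop tl.dropLast (s :: sents) else (tl, sents)
termination_by tl.length
decreasing_by
  have hne : tl ≠ [] := by intro e; subst e; simp at h
  have := List.length_pos_iff.mpr hne
  simp [List.length_dropLast]; omega

def process_section_names (text_list : List String) : String :=
  let p := pvALoop text_list []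
  let sections := p.1
  let sentences := p.2
  let sec :=
    if (!sections.isEmpty) &&
        (match sections.head? with | some s => !(s == "") | none => false)
    then "- " ++ PySem.Str.join " - " sections ++ " " else ""
  sec ++ "* " ++ PySem.Str.join " " sentences

-- ===== PORT B =====
-- 's and s[-1] in "!.:;?"' (membership in a string literal)
def pvIsSentenceB (s : String) : Bool :=
  !(s == "") &&
    (match PySem.Str.pyGet? s (-1) with
     | some c => "!.:;?".toList.contains c
     | none => false)

def process_section_names_alt (text_list : List String) : String :=
  -- the for-loop over reversed(text_list) with break counts the trailing sentences
  let k := (text_list.reverse.takeWhile pvIsSentenceB).length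
  let i := text_list.length - k
  let sections := text_list.take i
  let sentences := text_list.drop i
  let sec :=
    if (!sections.isEmpty) &&
        (match sections.head? with | some s => !(s == "") | none => false)
    then "- " ++ PySem.Str.join " - " sections ++ " " else ""
  sec ++ "* " ++ PySem.Str.join " " sentences

-- ===== PRECONDITION & SPEC =====
def Spec_process_section_names (text_list : List String) (out : String) : Prop := out = process_section_names_alt text_list
instance (text_list : List String) (out : String) : Decidable (Spec_process_section_names text_list out) := by unfold Spec_process_section_names; infer_instance

-- ===== CLAIM (what is proved, stated in full; the proofs are below) =====
def Claim_equal_process_section_names : Prop := ∀ (text_list : List String), Dom_process_section_names text_list → Spec_process_section_names text_list (process_section_names text_list)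

-- ===== LEMMAS AND PROOFS =====
theorem pvIsSentence_eq : pvIsSentenceA = pvIsSentenceB := by
  funext s
  unfold pvIsSentenceA pvIsSentenceB
  congr 1
  cases PySem.Str.pyGet? s (-1) with
  | none => rfl
  | some c => simp [PySem.Set.mem_ofList]

theorem pvALoop_eq (tl sents : List String) :
    pvALoop tl sents =
      ((tl.reverse.dropWhile pvIsSentenceA).reverse,
       (tl.reverse.takeWhile pvIsSentenceA).reverse ++ sents) := by
  induction tl using List.reverseRecOn generalizing sents with
  | nil => simp [pvALoop]
  | append_singleton xs x ih =>
      rw [pvALoop]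
      split
      · rename_i h; simp at h
      · rename_i s h
        rw [List.getLast?_concat] at h
        injection h with h; subst h
        rw [List.dropLast_concat]
        simp only [List.reverse_append, List.reverse_cons, List.reverse_nil,
          List.nil_append, List.cons_append, List.takeWhile, List.dropWhile]
        by_cases hx : pvIsSentenceA x
        · simp [hx, ih]
        · simp [Bool.not_eq_true] at hx
          simp [hx]

theorem process_section_names_eq (tl : List String) :
    process_section_names tl = process_section_names_alt tl := by
  unfold process_section_names process_section_names_alt
  rw [pvALoop_eq, pvIsSentence_eq]
  set t := tl.reverse.takeWhile pvIsSentenceB with ht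
  set d := tl.reverse.dropWhile pvIsSentenceB with hd
  have hsplit : tl = d.reverse ++ t.reverse := by
    have : tl.reverse = t ++ d := (List.takeWhile_append_dropWhile).symm
    calc tl = tl.reverse.reverse := (List.reverse_reverse tl).symm
      _ = (t ++ d).reverse := by rw [← this]
      _ = d.reverse ++ t.reverse := by simp
  have hlen : tl.length = d.length + t.length := by
    rw [hsplit]; simp [Nat.add_comm]
  have hi : tl.length - t.length = d.reverse.length := by simp [hlen]
  have htake : tl.take (tl.length - t.length) = d.reverse := by
    rw [hi]; conv_lhs => rw [hsplit]
    exact List.take_left ..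
  have hdrop : tl.drop (tl.length - t.length) = t.reverse := by
    rw [hi]; conv_lhs => rw [hsplit]
    exact List.drop_left ..
  simp [htake, hdrop]

-- ===== VERDICT (by name: the statement is the Claim_ definition above) =====
theorem process_section_names_spec : Claim_equal_process_section_names := by
  intro tl _
  exact process_section_names_eq tl
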